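-- pv_equiv track=rewrite | github.com/Haksell/codeforces | problems/2059C.py | smart
-- ===== SOURCE A (Python) =====
-- def smart(a):
--     ones = []
--     for ai in a:
--         o = 0
--         while ai and ai[-1] == 1:
--             o += 1
--             ai.pop()
--         ones.append(o)
--     ones.sort(reverse=True)
--     r = 0
--     while True:
--         while ones and ones[-1] < r:
--             ones.pop()
--         if not ones:
--             return r
--         r += 1
--         ones.pop()
-- ===== SOURCE B (Python) =====
-- def smart(a):
--     # counting-sort greedy (no sort): bucket the trailing-ones counts, then sweep values
--     # ascending, taking min(freq[v], v - r + 1) picks at value v.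
--     # (Note: A pops trailing 1s from the sublists in place; B does not mutate.)
--     freq = {}
--     mx = -1
--     for ai in a:
--         o = 0
--         i = len(ai) - 1
--         while i >= 0 and ai[i] == 1:
--             o += 1
--             i -= 1
--         freq[o] = freq.get(o, 0) + 1
--         if o > mx:
--             mx = o
--     r = 0
--     for v in range(mx + 1):
--         c = freq.get(v, 0)
--         if v >= r:
--             r += min(c, v - r + 1)
--     return r
-- ===== Notes on version B (the rewrite author's own statement) =====
-- stated objective: alternative
-- what changed: Replaces sorting the trailing-ones counts and popping them one by one with a counting-sort frequency table and a single ascending value sweep that takes min(freq[v], v-r+1) picks per value in O(1); B also does not mutate the input sublists where A pops from them.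
import Mathlib
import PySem

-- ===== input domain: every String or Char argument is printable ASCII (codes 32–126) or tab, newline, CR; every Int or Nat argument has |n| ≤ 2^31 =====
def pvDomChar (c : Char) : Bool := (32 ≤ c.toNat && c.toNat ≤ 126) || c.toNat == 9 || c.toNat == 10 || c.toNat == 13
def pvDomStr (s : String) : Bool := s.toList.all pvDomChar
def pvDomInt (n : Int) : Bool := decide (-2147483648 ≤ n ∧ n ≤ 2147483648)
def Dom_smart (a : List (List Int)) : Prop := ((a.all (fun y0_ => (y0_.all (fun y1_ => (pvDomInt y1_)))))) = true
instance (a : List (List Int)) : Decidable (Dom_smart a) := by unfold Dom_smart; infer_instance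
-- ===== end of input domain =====

-- B replaces A's sort-then-pop greedy by a counting-sort frequency sweep over the
-- trailing-ones values (objective: alternative algorithm, sort-free).
-- A pops the trailing 1s off the sublists in place; B does not mutate — the
-- equivalence proved here is about the RETURN value only.

-- ===== PORT A =====
-- `while ai and ai[-1] == 1: o += 1; ai.pop()`: counts trailing 1s; the pops at
-- the tail are modeled by structural recursion on the REVERSED list.
def smartTrail : List Int → Int
  | [] => 0
  | x :: xs => if x = 1 then smartTrail xs + 1 else 0

-- inner `while ones and ones[-1] < r: ones.pop()`, run on the reversed list
-- (pop from the tail = drop from the front of the reverse)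
def smartDropLow (r : Int) : List Int → List Int
  | [] => []
  | x :: xs => if x < r then smartDropLow r xs else x :: xs

lemma smartDropLow_length_le (r : Int) (l : List Int) :
    (smartDropLow r l).length ≤ l.length := by
  induction l with
  | nil => simp [smartDropLow]
  | cons x xs ih =>
    simp only [smartDropLow]
    split
    · exact le_trans ih (by simp)
    · simp

-- the outer `while True:` loop of A, on the reversed (ascending) list
def smartLoop (l : List Int) (r : Int) : Int :=
  if h : smartDropLow r l = [] then r
  else smartLoop (smartDropLow r l).tail (r + 1)
termination_by l.length
decreasing_by
  have h1 := smartDropLow_length_le r l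
  have h2 : (smartDropLow r l).length ≠ 0 := by simpa using h
  rw [List.length_tail]
  omega

def smart (a : List (List Int)) : Int :=
  let ones := a.foldl (fun acc ai => acc ++ [smartTrail ai.reverse]) []
  let sorted := PySem.List.sorted ones (fun x => x) true
  smartLoop sorted.reverse 0

-- ===== PORT B =====
-- `while i >= 0 and ai[i] == 1:` — the index walk from the end is recursion on
-- the reversed list.
def altTrail : List Int → Int
  | [] => 0
  | x :: xs => if x = 1 then altTrail xs + 1 else 0

def smart_alt (a : List (List Int)) : Int :=
  let st := a.foldl (fun (p : PySem.Dict Int Int × Int) ai =>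
      let o := altTrail ai.reverse
      (p.1.insert o (p.1.getD o 0 + 1), if o > p.2 then o else p.2))
    (PySem.Dict.empty, -1)
  (PySem.List.pyRange 0 (st.2 + 1) 1).foldl
    (fun r v =>
      let c := st.1.getD v 0
      if v ≥ r then r + min c (v - r + 1) else r) 0

-- ===== PRECONDITION & SPEC =====
def Spec_smart (a : List (List Int)) (out : Int) : Prop := out = smart_alt a
instance (a : List (List Int)) (out : Int) : Decidable (Spec_smart a out) := by unfold Spec_smart; infer_instance

-- ===== CLAIM (what is proved, stated in full; the proofs are below) =====
def Claim_equal_smart : Prop := ∀ (a : List (List Int)), Dom_smart a → Spec_smart a (smart a)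

-- ===== LEMMAS AND PROOFS =====

lemma altTrail_eq_smartTrail (l : List Int) : altTrail l = smartTrail l := by
  induction l with
  | nil => rfl
  | cons x xs ih => simp only [altTrail, smartTrail, ih]

-- canonical ascending greedy
def pvG : List Int → Int → Int
  | [], r => r
  | x :: xs, r => pvG xs (if r ≤ x then r + 1 else r)

lemma pvG_dropLow (l : List Int) (r : Int) :
    pvG l r = (match smartDropLow r l with
               | [] => r
               | _ :: xs => pvG xs (r + 1)) := by
  induction l with
  | nil => rfl
  | cons x xs ih =>
    simp only [pvG, smartDropLow]
    by_cases h : x < r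
    · have : ¬ r ≤ x := by omega
      simp only [this, if_false, if_pos h, ih]
    · have : r ≤ x := by omega
      simp only [this, if_true, if_neg h]

lemma smartLoop_eq_pvG (l : List Int) (r : Int) : smartLoop l r = pvG l r := by
  fun_induction smartLoop l r with
  | case1 l r h => rw [pvG_dropLow]; rw [h]
  | case2 l r h ih =>
    rw [pvG_dropLow l r]
    rcases hc : smartDropLow r l with _ | ⟨x, xs⟩
    · exact absurd hc h
    · rw [hc] at ih; simpa using ih

lemma foldl_append_map (f : List Int → Int) (a : List (List Int)) (acc : List Int) :
    a.foldl (fun acc ai => acc ++ [f ai]) acc = acc ++ a.map f := by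
  induction a generalizing acc with
  | nil => simp
  | cons x xs ih => simp [ih]

lemma pair_fold (a : List (List Int)) (d : PySem.Dict Int Int) (m : Int) :
    a.foldl (fun (p : PySem.Dict Int Int × Int) ai =>
        let o := altTrail ai.reverse
        (p.1.insert o (p.1.getD o 0 + 1), if o > p.2 then o else p.2)) (d, m)
      = ((a.map (fun ai => smartTrail ai.reverse)).foldl
            (fun d x => d.insert x (d.getD x 0 + 1)) d,
         (a.map (fun ai => smartTrail ai.reverse)).foldl
            (fun m x => if x > m then x else m) m) := by
  induction a generalizing d m with
  | nil => rfl
  | cons x xs ih =>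
    simp only [List.foldl_cons, List.map_cons]
    rw [ih]
    simp [altTrail_eq_smartTrail]

lemma foldl_max_le (L : List Int) (m : Int) :
    m ≤ L.foldl (fun m x => if x > m then x else m) m := by
  induction L generalizing m with
  | nil => simp
  | cons x xs ih =>
    simp only [List.foldl_cons]
    refine le_trans ?_ (ih _)
    split <;> omega

lemma mem_le_foldl_max (L : List Int) (m x : Int) (hx : x ∈ L) :
    x ≤ L.foldl (fun m x => if x > m then x else m) m := by
  induction L generalizing m with
  | nil => simp at hx
  | cons y ys ih =>
    simp only [List.foldl_cons]
    rcases List.mem_cons.mp hx with rfl | h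
    · refine le_trans ?_ (foldl_max_le ys _)
      split <;> omega
    · exact ih _ h

lemma smartTrail_nonneg (l : List Int) : 0 ≤ smartTrail l := by
  induction l with
  | nil => simp [smartTrail]
  | cons x xs ih => simp only [smartTrail]; split <;> omega

lemma count_flatMap_replicate (L : List Int) (R : List Int) (hR : R.Nodup) (x : Int) :
    (R.flatMap (fun v => List.replicate (L.count v) v)).count x
      = if x ∈ R then L.count x else 0 := by
  induction R with
  | nil => simp
  | cons v R ih =>
    have hv : v ∉ R := (List.nodup_cons.mp hR).1
    have hR' : R.Nodup := (List.nodup_cons.mp hR).2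
    simp only [List.flatMap_cons, List.count_append, ih hR', List.count_replicate,
      List.mem_cons]
    by_cases hxv : x = v
    · subst hxv
      simp [hv]
    · simp [hxv, Ne.symm hxv]

lemma pairwise_buckets (L R : List Int) (hR : R.Pairwise (· < ·)) :
    (R.flatMap (fun v => List.replicate (L.count v) v)).Pairwise (fun a b => a ≤ b) := by
  induction R with
  | nil => simp
  | cons v R ih =>
    have h1 : ∀ u ∈ R, v < u := (List.pairwise_cons.mp hR).1
    have hR' : R.Pairwise (· < ·) := hR.of_cons
    simp only [List.flatMap_cons]
    rw [List.pairwise_append]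
    refine ⟨?_, ih hR', ?_⟩
    · exact List.pairwise_replicate.mpr (Or.inr le_rfl)
    · intro x hx y hy
      have hxv : x = v := List.eq_of_mem_replicate hx
      rcases List.mem_flatMap.mp hy with ⟨u, hu, hyu⟩
      have hyu' : y = u := List.eq_of_mem_replicate hyu
      subst hxv; subst hyu'
      exact le_of_lt (h1 _ hu)

lemma pvG_replicate (c : Nat) (v : Int) (rest : List Int) (r : Int) :
    pvG (List.replicate c v ++ rest) r
      = pvG rest (if r ≤ v then r + min (c : Int) (v - r + 1) else r) := by
  induction c generalizing r with
  | zero =>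
    have h : (if r ≤ v then r + min ((0 : Nat) : Int) (v - r + 1) else r) = r := by
      simp only [Nat.cast_zero]
      split_ifs with h
      · have : min (0 : Int) (v - r + 1) = 0 := by
          rw [min_def]; split_ifs <;> omega
        omega
      · rfl
    rw [h]; rfl
  | succ c ih =>
    rw [List.replicate_succ, List.cons_append]
    show pvG (List.replicate c v ++ rest) (if r ≤ v then r + 1 else r)
      = pvG rest (if r ≤ v then r + min ((c + 1 : Nat) : Int) (v - r + 1) else r)
    by_cases h : r ≤ v
    · rw [if_pos h, ih]
      congr 1
      rw [min_def, min_def]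
      push_cast
      split_ifs <;> omega
    · rw [if_neg h, if_neg h, ih, if_neg h]

lemma pvG_flatMap (L R : List Int) (r : Int) :
    pvG (R.flatMap (fun v => List.replicate (L.count v) v)) r
      = R.foldl (fun r v => if v ≥ r then r + min ((L.count v : Int)) (v - r + 1) else r) r := by
  induction R generalizing r with
  | nil => rfl
  | cons v R ih =>
    simp only [List.flatMap_cons, List.foldl_cons, pvG_replicate, ge_iff_le]
    exact ih _

lemma sorted_true_reverse (L : List Int) :
    (PySem.List.sorted L (fun x => x) true).reverse = PySem.List.sorted L (fun x => x) false := by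
  refine (PySem.List.sorted_id_eq_of_perm_of_pairwise _ _ ?_ ?_).symm
  · exact (List.reverse_perm _).trans (PySem.List.sorted_perm _ _ _)
  · rw [List.pairwise_reverse]
    exact PySem.List.sorted_pairwise_rev L (fun x => x)

lemma sorted_eq_buckets (L : List Int) (M : Int)
    (hlo : ∀ x ∈ L, 0 ≤ x) (hhi : ∀ x ∈ L, x ≤ M) :
    PySem.List.sorted L (fun x => x) false
      = (PySem.List.pyRange 0 (M + 1) 1).flatMap (fun v => List.replicate (L.count v) v) := by
  refine PySem.List.sorted_id_eq_of_perm_of_pairwise _ _ ?_ ?_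
  · refine List.perm_iff_count.mpr (fun x => ?_)
    rw [count_flatMap_replicate L _ (PySem.List.nodup_pyRange_one 0 (M + 1)) x]
    by_cases hx : x ∈ PySem.List.pyRange 0 (M + 1) 1
    · rw [if_pos hx]
    · rw [if_neg hx]
      have hxL : x ∉ L := by
        intro hmem
        exact hx ((PySem.List.mem_pyRange_one).mpr ⟨hlo x hmem, by have := hhi x hmem; omega⟩)
      exact (List.count_eq_zero.mpr hxL).symm
  · exact pairwise_buckets L _ (PySem.List.pairwise_lt_pyRange_one 0 (M + 1))

-- ===== VERDICT (by name: the statement is the Claim_ definition above) =====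
theorem smart_spec : Claim_equal_smart := by
  intro a _
  unfold Spec_smart smart smart_alt
  simp only []
  rw [foldl_append_map, pair_fold]
  simp only [List.nil_append]
  set ones := a.map (fun ai => smartTrail ai.reverse) with hones
  set M := ones.foldl (fun m x => if x > m then x else m) (-1) with hM
  have hcounter : ones.foldl (fun d x => d.insert x (d.getD x 0 + 1)) PySem.Dict.empty
      = PySem.Dict.counter ones := PySem.Dict.foldl_insert_getD_add_one_eq_counter ones
  rw [smartLoop_eq_pvG, sorted_true_reverse, hcounter]
  have hlo : ∀ x ∈ ones, 0 ≤ x := by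
    intro x hx
    rcases List.mem_map.mp hx with ⟨ai, _, rfl⟩
    exact smartTrail_nonneg _
  have hhi : ∀ x ∈ ones, x ≤ M := fun x hx => mem_le_foldl_max ones (-1) x hx
  rw [sorted_eq_buckets ones M hlo hhi, pvG_flatMap]
  apply List.foldl_ext
  intro r v _
  simp [PySem.Dict.getD_counter]
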